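-- pv_equiv track=rewrite | github.com/singhsanket143/Unacademy_Pec_Python | uniquecharacters.py | getUniqueCharacters
-- ===== SOURCE A (Python) =====
-- def getUniqueCharacters(string):
-- 	freq_map = {}
-- 	for i in range(0, len(string)):
-- 		if(freq_map.get(string[i]) == None):
-- 			freq_map[string[i]] = 1
-- 		else:
-- 			freq_map[string[i]] += 1
--
-- 	result = []
-- 	for k in freq_map.keys():
-- 		if(freq_map[k] == 1):
-- 			result.append(k)
--
-- 	return tuple(result)
-- ===== SOURCE B (Python) =====
-- def getUniqueCharacters(string):
--     def go(chars):
--         if not chars: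
--             return ()
--         c, rest = chars[0], chars[1:]
--         if c in rest:
--             return go([x for x in rest if x != c])
--         return (c,) + go(rest)
--     return go(list(string))
-- ===== Notes on version B (the rewrite author's own statement) =====
-- stated objective: alternative
-- what changed: Replaced the frequency-table build plus key scan by a duplicate-elimination recursion: take the head character, and if it reappears in the tail strip all its occurrences and recurse, otherwise emit it and recurse on the tail; no counts are ever computed.
import Mathlib
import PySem

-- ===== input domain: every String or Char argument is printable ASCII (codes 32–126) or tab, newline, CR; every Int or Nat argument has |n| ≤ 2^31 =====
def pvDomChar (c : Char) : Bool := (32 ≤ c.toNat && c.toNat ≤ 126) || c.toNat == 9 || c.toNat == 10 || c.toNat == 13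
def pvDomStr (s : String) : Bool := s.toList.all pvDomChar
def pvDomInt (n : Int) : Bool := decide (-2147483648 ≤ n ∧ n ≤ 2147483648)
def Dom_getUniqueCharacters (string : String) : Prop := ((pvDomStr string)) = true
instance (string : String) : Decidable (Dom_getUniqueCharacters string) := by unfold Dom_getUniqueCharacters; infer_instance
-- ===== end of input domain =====

-- B replaces A's frequency dict + key scan by a duplicate-elimination recursion
-- (strip repeated heads, emit unrepeated ones); alternative algorithm, not claimed faster.

-- ===== PORT A =====
-- port of A: build a frequency dict over the indices, then collect keys of count 1.
-- string[i] yields the character; indices from range(0, len) are always in range, so pyGetD's default is never used.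
def getUniqueCharacters (string : String) : List String :=
  let cs := string.toList
  let freq_map : PySem.Dict Char Int :=
    (PySem.List.pyRange 0 (PySem.Str.len string) 1).foldl
      (fun d i =>
        let c := PySem.List.pyGetD cs i ' '
        match d.get? c with
        | none => d.insert c 1
        | some v => d.insert c (v + 1))
      PySem.Dict.empty
  freq_map.keys.foldl
    (fun result k =>
      if freq_map.getD k 0 == 1 then result ++ [String.ofList [k]] else result)
    []

-- ===== PORT B =====
-- port of Source B's helper go: head c; if c occurs in the tail, strip every c from the
-- tail and recurse; otherwise emit c and recurse on the tail.
def stripChar (c : Char) (l : List Char) : List Char := l.filter (fun x => x != c)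

lemma stripChar_len_le (c : Char) (l : List Char) : (stripChar c l).length ≤ l.length :=
  List.length_filter_le _ _

def goUnique : List Char → List String
  | [] => []
  | c :: rest =>
    if rest.contains c then goUnique (stripChar c rest)
    else String.ofList [c] :: goUnique rest
termination_by l => l.length
decreasing_by
  · exact Nat.lt_succ_of_le (stripChar_len_le c rest)
  · simp

def getUniqueCharacters_alt (string : String) : List String :=
  goUnique string.toList

-- ===== PRECONDITION & SPEC =====
def Spec_getUniqueCharacters (string : String) (out : List String) : Prop := out = getUniqueCharacters_alt string
instance (string : String) (out : List String) : Decidable (Spec_getUniqueCharacters string out) := by unfold Spec_getUniqueCharacters; infer_instance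

-- ===== CLAIM (what is proved, stated in full; the proofs are below) =====
def Claim_equal_getUniqueCharacters : Prop := ∀ (string : String), Dom_getUniqueCharacters string → Spec_getUniqueCharacters string (getUniqueCharacters string)

-- ===== LEMMAS AND PROOFS =====

-- A's dict-building step is exactly the counter step.
lemma step_eq_counter_step (d : PySem.Dict Char Int) (c : Char) :
    (match d.get? c with
     | none => d.insert c 1
     | some v => d.insert c (v + 1)) = d.insert c (d.getD c 0 + 1) := by
  unfold PySem.Dict.getD
  cases d.get? c <;> simp

-- filtering the deduplicated list with a predicate that only holds on count-1
-- elements (which occur once) gives the same list as filtering the original.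
lemma filter_foldl_add (p : Char → Bool) :
    ∀ (l s : List Char),
      (∀ x ∈ l, p x = true → l.count x = 1 ∧ x ∉ s) →
      (l.foldl PySem.Set.add s).filter p = s.filter p ++ l.filter p := by
  intro l
  induction l with
  | nil => intro s _; simp
  | cons a t ih =>
    intro s h
    have hstep : (a :: t).foldl PySem.Set.add s = t.foldl PySem.Set.add (PySem.Set.add s a) := by
      simp [List.foldl]
    rw [hstep]
    by_cases hpa : p a = true
    · obtain ⟨hc, hns⟩ := h a (by simp) hpa
      have hat : a ∉ t := by
        intro hmem
        have h1 : 1 ≤ t.count a := List.one_le_count_iff.mpr hmem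
        simp [List.count_cons_self] at hc
        omega
      have hadd : PySem.Set.add s a = s ++ [a] := by
        simp [PySem.Set.add, hns]
      rw [hadd, ih (s ++ [a])]
      · simp [List.filter_append, hpa]
      · intro x hx hpx
        have hxa : x ≠ a := fun he => hat (he ▸ hx)
        obtain ⟨hc', hns'⟩ := h x (by simp [hx]) hpx
        refine ⟨by simp [(Ne.symm hxa : a ≠ x)] at hc'; exact hc', ?_⟩
        simp [hxa]
        exact hns'
    · have hpa' : p a = false := by
        cases hp : p a with
        | true => exact absurd hp hpa
        | false => rfl
      have hsub : ∀ x ∈ t, p x = true → t.count x = 1 ∧ x ∉ PySem.Set.add s a := by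
        intro x hx hpx
        have hxa : x ≠ a := by
          intro he; rw [he] at hpx; exact hpa hpx
        obtain ⟨hc', hns'⟩ := h x (by simp [hx]) hpx
        refine ⟨by simp [(Ne.symm hxa : a ≠ x)] at hc'; exact hc', ?_⟩
        by_cases hmem : a ∈ s
        · simpa [PySem.Set.add, hmem] using hns'
        · simp [PySem.Set.add, hmem, hxa]
          exact hns'
      rw [ih (PySem.Set.add s a) hsub]
      have hfadd : (PySem.Set.add s a).filter p = s.filter p := by
        by_cases hmem : a ∈ s
        · simp [PySem.Set.add, hmem]
        · simp [PySem.Set.add, hmem, List.filter_append, hpa']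
      rw [hfadd]
      simp [hpa']

lemma key_lemma (cs : List Char) :
    (PySem.Set.ofList cs).filter (fun c => cs.count c == 1)
      = cs.filter (fun c => cs.count c == 1) := by
  unfold PySem.Set.ofList
  have := filter_foldl_add (fun c => cs.count c == 1) cs PySem.Set.empty ?_
  · simpa [PySem.Set.empty] using this
  · intro x _ hpx
    refine ⟨by simpa using hpx, by simp [PySem.Set.empty]⟩

-- B's recursion computes the count-1 characters, in string order.
lemma goUnique_eq : ∀ (l : List Char),
    goUnique l = (l.filter (fun c => l.count c == 1)).map (fun c => String.ofList [c]) := by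
  intro l
  induction l using goUnique.induct with
  | case1 => simp [goUnique]
  | case2 c rest hmem ih =>
    have hcr : c ∈ rest := by simpa using hmem
    have h1 : 1 ≤ rest.count c := List.one_le_count_iff.mpr hcr
    rw [goUnique, if_pos hmem, ih]
    congr 1
    have hcc : (((c :: rest).count c == 1) : Bool) = false := by
      simp [List.count_cons_self]
      omega
    rw [List.filter_cons, hcc]
    unfold stripChar
    rw [List.filter_filter]
    apply List.filter_congr
    intro x hx
    by_cases hxc : x = c
    · subst hxc
      simp [List.count_cons_self]
      omega
    · have hcx : ¬ c = x := fun hh => hxc hh.symm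
      simp [hxc, hcx]
  | case3 c rest hmem ih =>
    have hcr : c ∉ rest := by simpa using hmem
    rw [goUnique, if_neg hmem, ih]
    have hcc : (((c :: rest).count c == 1) : Bool) = true := by
      simp [List.count_cons_self, List.count_eq_zero_of_not_mem hcr]
    rw [List.filter_cons, hcc]
    congr 2
    apply List.filter_congr
    intro x hx
    have hxc : x ≠ c := fun he => hcr (he ▸ hx)
    have hcx : ¬ c = x := fun hh => hxc hh.symm
    simp [hcx]

-- ===== VERDICT (by name: the statement is the Claim_ definition above) =====
theorem getUniqueCharacters_spec : Claim_equal_getUniqueCharacters := by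
  intro string _
  unfold Spec_getUniqueCharacters getUniqueCharacters getUniqueCharacters_alt
  set cs := string.toList with hcs
  have hfold :
      (PySem.List.pyRange 0 (PySem.Str.len string) 1).foldl
        (fun (d : PySem.Dict Char Int) i =>
          let c := PySem.List.pyGetD cs i ' '
          match d.get? c with
          | none => d.insert c 1
          | some v => d.insert c (v + 1))
        PySem.Dict.empty = PySem.Dict.counter cs := by
    have hlen : PySem.Str.len string = PySem.List.len cs := by
      simp [PySem.Str.len_eq, PySem.List.len, hcs]
    rw [hlen]
    have := PySem.List.foldl_pyRange_zero_pyGetD cs ' '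
      (fun (d : PySem.Dict Char Int) c =>
        match d.get? c with
        | none => d.insert c 1
        | some v => d.insert c (v + 1)) PySem.Dict.empty
    rw [this]
    have hfun : (fun (d : PySem.Dict Char Int) c =>
        match d.get? c with
        | none => d.insert c 1
        | some v => d.insert c (v + 1))
        = (fun (d : PySem.Dict Char Int) c => d.insert c (d.getD c 0 + 1)) := by
      funext d c; exact step_eq_counter_step d c
    rw [hfun, PySem.Dict.foldl_insert_getD_add_one_eq_counter]
  simp only [hfold]
  rw [PySem.List.foldl_append_if (fun k => (PySem.Dict.counter cs).getD k 0 == 1)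
        (fun k => String.ofList [k]) ((PySem.Dict.counter cs).keys) []]
  rw [PySem.Dict.keys_counter]
  have hp : (fun k => (PySem.Dict.counter cs).getD k 0 == 1)
      = (fun c => cs.count c == 1) := by
    funext k
    rw [PySem.Dict.getD_counter]
    simp
  rw [hp, key_lemma, goUnique_eq]
  simp
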